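-- pv_equiv track=rewrite | github.com/Fawers/520-8026 | review1/ex_geracoes.py | nome_geracao_com_dicionarios
-- ===== SOURCE A (Python) =====
-- def nome_geracao_com_dicionarios(ano: int) -> str:
--     geracoes = {
--         1964: 'Baby Boomer',
--         1979: 'X',
--         1994: 'Y',
--     }
--
--     for k in geracoes:
--         if ano <= k:
--             return geracoes[k]
--
--     # ↓↓ desnecessário
--     else:
--         return 'Z'
-- ===== SOURCE B (Python) =====
-- def nome_geracao_com_dicionarios(ano: int) -> str:
--     # binary search (bisect_left) over sorted boundary years
--     thresholds = [1964, 1979, 1994]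
--     names = ['Baby Boomer', 'X', 'Y', 'Z']
--     lo, hi = 0, len(thresholds)
--     while lo < hi:
--         mid = (lo + hi) // 2
--         if thresholds[mid] < ano:
--             lo = mid + 1
--         else:
--             hi = mid
--     return names[lo]
-- ===== Notes on version B (the rewrite author's own statement) =====
-- stated objective: idiomatic
-- what changed: Replaces the linear scan over a dict of year thresholds with a bisect_left binary search over a sorted boundary list paired with a parallel names list.
import Mathlib
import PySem

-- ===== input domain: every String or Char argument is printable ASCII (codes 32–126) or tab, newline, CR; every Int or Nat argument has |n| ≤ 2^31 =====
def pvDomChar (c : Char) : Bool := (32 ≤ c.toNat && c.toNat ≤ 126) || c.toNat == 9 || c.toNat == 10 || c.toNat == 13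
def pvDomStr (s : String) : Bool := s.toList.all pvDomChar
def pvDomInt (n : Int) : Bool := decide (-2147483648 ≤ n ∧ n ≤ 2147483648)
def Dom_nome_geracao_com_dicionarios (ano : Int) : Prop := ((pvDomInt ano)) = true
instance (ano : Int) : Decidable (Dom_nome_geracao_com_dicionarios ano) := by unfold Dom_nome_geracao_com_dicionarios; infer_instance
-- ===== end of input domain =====

-- B replaces A's linear scan over a dict with a bisect_left binary search over sorted boundary years (idiomatic; no speed claim).


-- ===== PORT A =====
-- the 'for k in geracoes: if ano <= k: return geracoes[k]' loop; keys are distinct so geracoes[k] = the pair's value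
def pvLoopA (ano : Int) : List (Int × String) → String
  | [] => "Z"
  | (k, v) :: rest => if ano ≤ k then v else pvLoopA ano rest

def nome_geracao_com_dicionarios (ano : Int) : String :=
  pvLoopA ano [(1964, "Baby Boomer"), (1979, "X"), (1994, "Y")]

-- ===== PORT B =====
-- the hand-written bisect_left while-loop of Source B
def pvBisect (thresholds : List Int) (ano : Int) (lo hi : Nat) : Nat :=
  if lo < hi then
    let mid := (lo + hi) / 2
    if thresholds.getD mid 0 < ano then pvBisect thresholds ano (mid + 1) hi
    else pvBisect thresholds ano lo mid
  else lo
termination_by hi - lo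
decreasing_by all_goals omega

def nome_geracao_com_dicionarios_alt (ano : Int) : String :=
  let thresholds : List Int := [1964, 1979, 1994]
  let names : List String := ["Baby Boomer", "X", "Y", "Z"]
  names.getD (pvBisect thresholds ano 0 thresholds.length) "Z"

-- ===== PRECONDITION & SPEC =====
def Spec_nome_geracao_com_dicionarios (ano : Int) (out : String) : Prop := out = nome_geracao_com_dicionarios_alt ano
instance (ano : Int) (out : String) : Decidable (Spec_nome_geracao_com_dicionarios ano out) := by unfold Spec_nome_geracao_com_dicionarios; infer_instance

-- ===== CLAIM (what is proved, stated in full; the proofs are below) =====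
def Claim_equal_nome_geracao_com_dicionarios : Prop := ∀ (ano : Int), Dom_nome_geracao_com_dicionarios ano → Spec_nome_geracao_com_dicionarios ano (nome_geracao_com_dicionarios ano)

-- ===== LEMMAS AND PROOFS =====
lemma pvBisect_eval (ano : Int) :
    pvBisect [1964, 1979, 1994] ano 0 3 =
      if 1979 < ano then (if 1994 < ano then 3 else 2) else (if 1964 < ano then 1 else 0) := by
  rw [pvBisect]; norm_num
  split_ifs <;> (rw [pvBisect] <;> norm_num) <;>
    split_ifs <;> first | rfl | (rw [pvBisect]; norm_num) | omega

-- ===== VERDICT (by name: the statement is the Claim_ definition above) =====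
theorem nome_geracao_com_dicionarios_spec : Claim_equal_nome_geracao_com_dicionarios := by
  intro ano _
  unfold Spec_nome_geracao_com_dicionarios nome_geracao_com_dicionarios nome_geracao_com_dicionarios_alt
  norm_num [pvLoopA, pvBisect_eval]
  split_ifs <;> first | rfl | omega
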